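-- pv_equiv track=rewrite | github.com/st53182/maturity | scrum_roles_content.py | sanitize_errors
-- ===== SOURCE A (Python) =====
-- from typing import Dict, List, Optional, Set
--
-- COMMON_ERRORS: List[Dict] = [
--     {
--         "key": "sm_runs_dev",
--         "title": {"ru": "Scrum-мастер управляет разработкой",
--                   "en": "Scrum Master runs development"},
--         "consequences": [
--             {"ru": "Команда теряет ответственность за результат",
--              "en": "The team loses ownership of the outcome"},
--             {"ru": "SM перегружен и не улучшает процесс",
--              "en": "SM is overloaded and stops improving the process"},
--         ],
--     },
--     {
--         "key": "po_runs_team",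
--         "title": {"ru": "Владелец продукта управляет командой",
--                   "en": "PO manages the team"},
--         "consequences": [
--             {"ru": "Команда не чувствует ответственности за «как»",
--              "en": "The team stops owning the 'how'"},
--             {"ru": "Конфликты между PO и командой",
--              "en": "PO vs team conflicts emerge"},
--         ],
--     },
--     {
--         "key": "team_not_planning",
--         "title": {"ru": "Команда не участвует в планировании",
--                   "en": "The team is not part of planning"},
--         "consequences": [
--             {"ru": "Нереалистичные оценки и обещания",
--              "en": "Unrealistic estimates and promises"},
--             {"ru": "Перегруз и срыв сроков",
--              "en": "Overload and missed deadlines"},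
--         ],
--     },
--     {
--         "key": "no_product_ownership",
--         "title": {"ru": "Нет ответственности за продукт",
--                   "en": "No one owns the product"},
--         "consequences": [
--             {"ru": "Делаем всё подряд и теряем фокус",
--              "en": "We chase everything and lose focus"},
--             {"ru": "Никто не защищает ценность",
--              "en": "Nobody protects the value"},
--         ],
--     },
--     {
--         "key": "sm_as_secretary",
--         "title": {"ru": "SM превращается в администратора встреч",
--                   "en": "SM becomes a meeting secretary"},
--         "consequences": [
--             {"ru": "Процесс не улучшается",
--              "en": "The process stops improving"},
--             {"ru": "Препятствия остаются нерешёнными",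
--              "en": "Impediments stay unresolved"},
--         ],
--     },
--     {
--         "key": "po_designs_solution",
--         "title": {"ru": "PO диктует, как реализовать задачу",
--                   "en": "PO dictates how to implement"},
--         "consequences": [
--             {"ru": "Теряется экспертность команды",
--              "en": "The team's expertise is wasted"},
--             {"ru": "Решения получаются хуже, чем могли бы",
--              "en": "Solutions end up weaker than they could be"},
--         ],
--     },
-- ]
--
-- def valid_error_keys() -> Set[str]:
--     return {e["key"] for e in COMMON_ERRORS}
--
-- def sanitize_errors(raw) -> List[str]:
--     if not isinstance(raw, list):
--         return []
--     valid = valid_error_keys()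
--     seen: Set[str] = set()
--     out: List[str] = []
--     for k in raw:
--         if isinstance(k, str) and k in valid and k not in seen:
--             seen.add(k)
--             out.append(k)
--     return out
-- ===== SOURCE B (Python) =====
-- def valid_error_keys():
--     return {"sm_runs_dev", "po_runs_team", "team_not_planning",
--             "no_product_ownership", "sm_as_secretary", "po_designs_solution"}
--
-- def _find_valid(rest, valid):
--     # scan for the first valid key; return it with the remaining suffix
--     for j, x in enumerate(rest):
--         if isinstance(x, str) and x in valid:
--             return x, rest[j + 1:]
--     return None
--
-- def sanitize_errors(raw):
--     if not isinstance(raw, list):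
--         return []
--     valid = valid_error_keys()
--     out = []
--     rest = raw
--     while True:
--         found = _find_valid(rest, valid)
--         if found is None:
--             return out
--         x, suffix = found
--         out.append(x)
--         rest = [y for y in suffix if y != x]
-- ===== Notes on version B (the rewrite author's own statement) =====
-- stated objective: alternative
-- what changed: Replaces A's single accumulating loop with a seen-set and per-element dedup branch by a loop that repeatedly scans for the first valid key, keeps it, and purges all its later duplicates from the remaining suffix, so no seen set is maintained (correct because each valid key can be found at most once after purging).
import Mathlib
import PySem

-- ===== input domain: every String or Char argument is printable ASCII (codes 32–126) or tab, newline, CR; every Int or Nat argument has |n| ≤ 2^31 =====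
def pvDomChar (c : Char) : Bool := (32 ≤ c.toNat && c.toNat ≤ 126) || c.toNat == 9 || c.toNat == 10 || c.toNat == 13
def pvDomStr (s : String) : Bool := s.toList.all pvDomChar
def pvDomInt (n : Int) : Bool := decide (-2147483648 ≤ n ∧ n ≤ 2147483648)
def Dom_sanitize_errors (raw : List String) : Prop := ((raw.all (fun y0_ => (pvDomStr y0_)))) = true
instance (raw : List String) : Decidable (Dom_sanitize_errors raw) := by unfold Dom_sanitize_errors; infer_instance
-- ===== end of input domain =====

-- B replaces A's seen-set accumulating loop by a find-first-valid-key-then-purge-its-duplicates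
-- loop that maintains no seen set; objective: alternative.

-- ===== PORT A =====
-- valid_error_keys(): the set of "key" fields of COMMON_ERRORS, in order of appearance
def validKeysA : PySem.Set String :=
  PySem.Set.ofList ["sm_runs_dev", "po_runs_team", "team_not_planning",
                    "no_product_ownership", "sm_as_secretary", "po_designs_solution"]

def sanitize_errors (raw : List String) : List String :=
  -- raw : List String, so `isinstance(raw, list)` and `isinstance(k, str)` are always true
  (raw.foldl
    (fun (st : PySem.Set String × List String) k =>
      if PySem.Set.contains validKeysA k && !(PySem.Set.contains st.1 k)
      then (PySem.Set.add st.1 k, st.2 ++ [k])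
      else st)
    ((PySem.Set.empty : PySem.Set String), ([] : List String))).2

-- ===== PORT B =====
def validKeysB : PySem.Set String :=
  PySem.Set.ofList ["sm_runs_dev", "po_runs_team", "team_not_planning",
                    "no_product_ownership", "sm_as_secretary", "po_designs_solution"]

-- _find_valid(rest, valid): first valid key together with the suffix after it (none if no valid key)
def findValidB : List String → Option (String × List String)
  | [] => none
  | x :: t => if PySem.Set.contains validKeysB x then some (x, t) else findValidB t

-- termination measure for B's while loop: the found suffix is strictly shorter (cited by goB)
lemma findValidB_length : ∀ {l : List String} {x : String} {t : List String},
    findValidB l = some (x, t) → t.length < l.length := by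
  intro l
  induction l with
  | nil => intro x t h; simp [findValidB] at h
  | cons a l ih =>
    intro x t h
    by_cases ha : PySem.Set.contains validKeysB a
    · simp only [findValidB, ha, if_true, Option.some.injEq, Prod.mk.injEq] at h
      simp [← h.2]
    · have haf : PySem.Set.contains validKeysB a = false := by
        cases hv : PySem.Set.contains validKeysB a <;> simp_all
      simp only [findValidB, haf, Bool.false_eq_true, if_false] at h
      have := ih h
      simp; omega

-- B's while loop: find the first valid key, keep it, purge its duplicates from the suffix
def goB (rest : List String) (out : List String) : List String :=
  match hf : findValidB rest with
  | none => out
  | some (x, suffix) => goB (suffix.filter (fun y => y != x)) (out ++ [x])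
termination_by rest.length
decreasing_by
  have h1 := findValidB_length hf
  have h2 := List.length_filter_le (fun y => y != x) suffix
  omega

def sanitize_errors_alt (raw : List String) : List String := goB raw []

-- ===== PRECONDITION & SPEC =====
def Spec_sanitize_errors (raw : List String) (out : List String) : Prop := out = sanitize_errors_alt raw
instance (raw : List String) (out : List String) : Decidable (Spec_sanitize_errors raw out) := by unfold Spec_sanitize_errors; infer_instance

-- ===== CLAIM =====
def Claim_equal_sanitize_errors : Prop := ∀ (raw : List String), Dom_sanitize_errors raw → Spec_sanitize_errors raw (sanitize_errors raw)

-- ===== LEMMAS AND PROOFS =====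

-- reduction lemmas for the WF-recursive goB
lemma goB_of_find_none (rest out : List String) (h : findValidB rest = none) :
    goB rest out = out := by
  rw [goB]; split <;> simp_all

lemma goB_of_find_some (rest out : List String) (x : String) (suffix : List String)
    (h : findValidB rest = some (x, suffix)) :
    goB rest out = goB (suffix.filter (fun y => y != x)) (out ++ [x]) := by
  rw [goB]; split <;> simp_all

-- an invalid head is skipped by B's scan
lemma findValidB_cons_invalid (h : String) (hnv : PySem.Set.contains validKeysB h = false)
    (l : List String) : findValidB (h :: l) = findValidB l := by
  have hm : h ∉ validKeysB := by simpa [PySem.Set.contains] using hnv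
  simp [findValidB, hm]

lemma goB_cons_invalid (h : String) (hnv : PySem.Set.contains validKeysB h = false)
    (l out : List String) : goB (h :: l) out = goB l out := by
  cases hl : findValidB l with
  | none =>
    rw [goB_of_find_none _ _ ((findValidB_cons_invalid h hnv l).trans hl),
        goB_of_find_none _ _ hl]
  | some p =>
    rw [goB_of_find_some _ _ p.1 p.2 ((findValidB_cons_invalid h hnv l).trans hl),
        goB_of_find_some _ _ p.1 p.2 hl]

-- Invariant: from loop state (s, o), A's loop produces what B's loop produces from
-- (the remaining list with all already-seen elements removed, o).
lemma loopA_eq_goB :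
    ∀ (l : List String) (s : PySem.Set String) (o : List String),
      (l.foldl
        (fun (st : PySem.Set String × List String) k =>
          if PySem.Set.contains validKeysA k && !(PySem.Set.contains st.1 k)
          then (PySem.Set.add st.1 k, st.2 ++ [k])
          else st)
        (s, o)).2
      = goB (l.filter (fun x => !(PySem.Set.contains s x))) o := by
  intro l
  induction l with
  | nil => intro s o; rw [goB_of_find_none _ _ rfl]; rfl
  | cons h t ih =>
    intro s o
    cases hc : PySem.Set.contains s h with
    | true =>
      -- h already seen: A's loop skips it, and B never receives it
      simp only [List.foldl_cons, hc, Bool.not_true, Bool.and_false,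
        Bool.false_eq_true, if_false, List.filter_cons, Bool.not_true]
      exact ih s o
    | false =>
      have hns : h ∉ s := by simpa [PySem.Set.contains] using hc
      cases hp : PySem.Set.contains validKeysA h with
      | true =>
        -- valid, unseen: A appends h and marks it seen; B finds h first and purges the suffix
        have hvB : PySem.Set.contains validKeysB h = true := hp
        have hmB : h ∈ validKeysB := by simpa [PySem.Set.contains] using hvB
        have hadd : PySem.Set.add s h = s ++ [h] := by
          simp [PySem.Set.add, PySem.Set.contains, hns]
        simp only [List.foldl_cons, hp, hc, Bool.not_false, Bool.and_true,
          if_true, hadd]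
        rw [ih (s ++ [h]) (o ++ [h])]
        have hfe : t.filter (fun x => !(PySem.Set.contains (s ++ [h]) x))
            = (t.filter (fun x => !(PySem.Set.contains s x))).filter (fun y => y != h) := by
          rw [List.filter_filter]
          apply List.filter_congr
          intro x _
          by_cases hxh : x = h
          · simp [hxh, PySem.Set.contains]
          · simp [PySem.Set.contains, hxh]
        rw [hfe]
        simp only [List.filter_cons, hc, Bool.not_false, if_true]
        rw [goB_of_find_some (h :: (t.filter (fun x => !(PySem.Set.contains s x)))) o h
              (t.filter (fun x => !(PySem.Set.contains s x))) (by simp [findValidB, hmB])]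
      | false =>
        -- invalid: A's loop skips; B's scan skips it too
        have hnB : PySem.Set.contains validKeysB h = false := hp
        simp only [List.foldl_cons, hp, Bool.false_and, Bool.false_eq_true, if_false]
        rw [ih s o]
        simp only [List.filter_cons, hc, Bool.not_false, if_true]
        rw [goB_cons_invalid h hnB]

theorem sanitize_errors_eq (raw : List String) :
    sanitize_errors raw = sanitize_errors_alt raw := by
  unfold sanitize_errors sanitize_errors_alt
  rw [loopA_eq_goB raw PySem.Set.empty []]
  congr 1
  simp [PySem.Set.empty, PySem.Set.contains]

-- ===== VERDICT =====
theorem sanitize_errors_spec : Claim_equal_sanitize_errors := by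
  intro raw _
  exact sanitize_errors_eq raw
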